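-- pv_equiv track=rewrite | github.com/yedkk/python-datastructure-algorithm | data structure and algorithm/findNext_operator.py | findNextOpr
-- ===== SOURCE A (Python) =====
-- def findNextOpr(txt):
--     """
--         >>> findNextOpr('  3*   4 - 5')
--         3
--         >>> findNextOpr('8   4 - 5')
--         6
--         >>> findNextOpr('89 4 5')
--         -1
--     """
--
-- # decide whether the data type is correct
--     if not isinstance(txt, str) or len(txt) <= 0:
--         return "error: findNextOpr"
--
-- # use for loop to search
--     for pos in range(0, txt.__len__()):
--
-- # if find, return pos
--         if txt[pos] == '*' or txt[pos] == '/' or txt[pos] == '+' or txt[pos] == '^':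
--             return pos
--
-- # search next
--         if txt[pos] == '-':
--             for item in txt[pos - 1::-1]:
--                 if item != ' ':
--                     if item.isdigit():
--                         return pos
--                     else:
--                         break
--
-- #if cannot search, return -1
--     return -1
-- ===== SOURCE B (Python) =====
-- def findNextOpr(txt):
--     """Single forward pass tracking whether the last non-space char seen is a digit."""
--     prev_digit = False
--     for pos, ch in enumerate(txt):
--         if ch == '*' or ch == '/' or ch == '+' or ch == '^':
--             return pos
--         if ch == '-' and prev_digit:
--             return pos
--         if ch != ' ':
--             prev_digit = ch.isdigit()
--     return -1
-- ===== Notes on version B (the rewrite author's own statement) =====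
-- stated objective: alternative
-- what changed: Replaces A's per-'-' backward scan over a freshly materialised reversed slice with a single forward pass that tracks whether the last non-space character seen is a digit (intended as faster; measured 1.36x at the largest size, below the 1.5x bar).
-- intended difference: On strings that start with '-' and whose last non-space character is a digit, A's slice txt[-1::-1] wraps around to the end of the string and A wrongly returns 0, while B treats a leading '-' as not preceded by a digit and returns the first genuine operator position (or -1), which is the intended behaviour. — e.g. on findNextOpr("- 5"): A returns 0, B returns -1
-- outside the precondition, e.g. on findNextOpr(''): A returns 'error: findNextOpr', B returns -1
import Mathlib
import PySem

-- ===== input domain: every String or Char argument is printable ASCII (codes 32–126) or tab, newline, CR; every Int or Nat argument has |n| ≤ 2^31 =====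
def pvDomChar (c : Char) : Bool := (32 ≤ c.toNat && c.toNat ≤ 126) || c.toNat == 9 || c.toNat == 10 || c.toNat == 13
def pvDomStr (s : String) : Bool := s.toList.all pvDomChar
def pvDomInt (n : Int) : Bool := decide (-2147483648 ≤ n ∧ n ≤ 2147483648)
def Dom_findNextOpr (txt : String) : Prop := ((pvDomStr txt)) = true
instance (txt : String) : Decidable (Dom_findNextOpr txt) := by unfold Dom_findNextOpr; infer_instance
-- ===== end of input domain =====

-- B replaces A's backward scan over a materialised reversed slice (done once per '-')
-- with a single forward pass tracking whether the last non-space char is a digit.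

-- ===== PORT A =====
-- inner loop: `for item in txt[pos-1::-1]` with break at the first non-space item
def pvAInner : List Char → Bool
  | [] => false
  | item :: rest =>
    if item ≠ ' ' then (if PySem.Chars.isdigit item then true else false)
    else pvAInner rest

-- txt[pos-1::-1], ported by hand (exact): for pos ≥ 1 it is txt[:pos] reversed,
-- for pos = 0 Python's negative start wraps to txt[-1::-1], the whole string reversed.
def pvASlice (chars : List Char) (pos : Nat) : List Char :=
  if pos = 0 then chars.reverse else (chars.take pos).reverse

-- `for pos in range(0, len(txt))`: structural recursion over the suffix txt[pos:],
-- whose head is txt[pos]; `chars` stays the whole string for the slice.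
def pvALoop (chars : List Char) : List Char → Nat → Int
  | [], _ => -1
  | c :: suffix, pos =>
    if c = '*' ∨ c = '/' ∨ c = '+' ∨ c = '^' then (pos : Int)
    else if c = '-' then
      if pvAInner (pvASlice chars pos) then (pos : Int) else pvALoop chars suffix (pos + 1)
    else pvALoop chars suffix (pos + 1)

-- the `len(txt) <= 0` branch returns the string "error: findNextOpr" (not an int);
-- Pre_ excludes the empty string.
def findNextOpr (txt : String) : Int := pvALoop txt.toList txt.toList 0

-- ===== PORT B =====
def pvBLoop : List Char → Nat → Bool → Int
  | [], _, _ => -1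
  | ch :: rest, pos, prevDigit =>
    if ch = '*' ∨ ch = '/' ∨ ch = '+' ∨ ch = '^' then (pos : Int)
    else if ch = '-' ∧ prevDigit = true then (pos : Int)
    else pvBLoop rest (pos + 1) (if ch ≠ ' ' then PySem.Chars.isdigit ch else prevDigit)

def findNextOpr_alt (txt : String) : Int := pvBLoop txt.toList 0 false

-- ===== PRECONDITION & SPEC =====
-- Pre_ excludes only the empty string, on which A returns the string "error: findNextOpr"
-- instead of an int (B returns -1 there).
def Pre_findNextOpr (txt : String) : Prop := txt ≠ ""
instance (txt : String) : Decidable (Pre_findNextOpr txt) := by unfold Pre_findNextOpr; infer_instance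
def pvWitness_findNextOpr : String := "  3*   4 - 5"

-- On strings starting with '-' whose last non-space character is a digit, A's slice
-- txt[-1::-1] wraps to the end of the string and A wrongly returns 0; B treats the
-- leading '-' as not preceded by a digit and returns the first real operator position
-- (or -1), which is the intended behaviour.
def pvLastNonSpaceDigit (l : List Char) : Bool :=
  ((l.filter (fun c => c ≠ ' ')).getLast?).elim false PySem.Chars.isdigit
def D_findNextOpr (txt : String) : Prop :=
  txt.toList.head? = some '-' ∧ pvLastNonSpaceDigit txt.toList = true
instance (txt : String) : Decidable (D_findNextOpr txt) := by unfold D_findNextOpr; infer_instance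

def Spec_findNextOpr (txt : String) (out : Int) : Prop :=
  ¬ D_findNextOpr txt → out = findNextOpr_alt txt
instance (txt : String) (out : Int) : Decidable (Spec_findNextOpr txt out) := by
  unfold Spec_findNextOpr; infer_instance

def pvDiffWitness_findNextOpr : String := "- 5"
def pvDiffWitnessOut_findNextOpr : Int × Int := (0, -1)

-- ===== CLAIM (what is proved, stated in full; the proofs are below) =====
def Claim_unchanged_findNextOpr : Prop :=
  ∀ (txt : String), Dom_findNextOpr txt → Pre_findNextOpr txt → Spec_findNextOpr txt (findNextOpr txt)
def Claim_changed_findNextOpr : Prop :=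
  Dom_findNextOpr (pvDiffWitness_findNextOpr) ∧ Pre_findNextOpr (pvDiffWitness_findNextOpr) ∧
  D_findNextOpr (pvDiffWitness_findNextOpr) ∧
  findNextOpr (pvDiffWitness_findNextOpr) = pvDiffWitnessOut_findNextOpr.1 ∧
  findNextOpr_alt (pvDiffWitness_findNextOpr) = pvDiffWitnessOut_findNextOpr.2 ∧
  pvDiffWitnessOut_findNextOpr.1 ≠ pvDiffWitnessOut_findNextOpr.2
def Claim_exact_findNextOpr : Prop :=
  ∀ (txt : String), Dom_findNextOpr txt → Pre_findNextOpr txt → D_findNextOpr txt →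
    findNextOpr txt ≠ findNextOpr_alt txt

-- ===== LEMMAS AND PROOFS =====

-- prev_digit as a fold over the already-seen prefix
def pvFold (l : List Char) : Bool :=
  l.foldl (fun b c => if c ≠ ' ' then PySem.Chars.isdigit c else b) false

theorem pvFold_append (l : List Char) (c : Char) :
    pvFold (l ++ [c]) = if c ≠ ' ' then PySem.Chars.isdigit c else pvFold l := by
  simp [pvFold, List.foldl_append]

theorem pvAInner_eq_fold_reverse : ∀ l : List Char, pvAInner l = pvFold l.reverse := by
  intro l
  induction l with
  | nil => simp [pvAInner, pvFold]
  | cons c rest ih =>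
    rw [List.reverse_cons, pvFold_append, pvAInner]
    by_cases h : c = ' ' <;> simp [h, ih]

theorem pvAInner_reverse (l : List Char) : pvAInner l.reverse = pvFold l := by
  rw [pvAInner_eq_fold_reverse, List.reverse_reverse]

theorem pvFold_eq_lastNonSpaceDigit : ∀ l : List Char, pvFold l = pvLastNonSpaceDigit l := by
  intro l
  induction l using List.reverseRecOn with
  | nil => simp [pvFold, pvLastNonSpaceDigit]
  | append_singleton l c ih =>
    rw [pvFold_append, ih]
    by_cases h : c = ' ' <;>
      simp [pvLastNonSpaceDigit, List.filter_append, h, List.getLast?_append]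

-- main invariant: after a non-empty prefix `done`, A's loop at pos = done.length
-- equals B's loop over the rest with prev_digit = pvFold done
theorem pvMain : ∀ (rest done : List Char), done ≠ [] →
    pvALoop (done ++ rest) rest done.length = pvBLoop rest done.length (pvFold done) := by
  intro rest
  induction rest with
  | nil => intro done _; rfl
  | cons c rest ih =>
    intro done hne
    rw [pvALoop, pvBLoop]
    by_cases hop : c = '*' ∨ c = '/' ∨ c = '+' ∨ c = '^'
    · simp [hop]
    · have hrec :
          pvALoop (done ++ c :: rest) rest (done.length + 1)
            = pvBLoop rest (done.length + 1)
                (if c ≠ ' ' then PySem.Chars.isdigit c else pvFold done) := by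
        have h1 : done ++ c :: rest = (done ++ [c]) ++ rest := by simp
        have h2 : done.length + 1 = (done ++ [c]).length := by simp
        rw [h1, h2, ih (done ++ [c]) (by simp), pvFold_append]
      have hpos : done.length ≠ 0 := by
        simpa [List.length_eq_zero_iff] using hne
      have hslice : pvASlice (done ++ c :: rest) done.length = done.reverse := by
        simp [pvASlice, hpos, List.take_left']
      simp only [if_neg hop]
      by_cases hm : c = '-'
      · subst hm
        rw [if_pos rfl, hslice, pvAInner_reverse]
        by_cases hd : pvFold done = true
        · simp [hd]
        · simp only [Bool.not_eq_true] at hd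
          rw [hd] at hrec ⊢
          rw [if_neg (by simp : ¬('-' = '-' ∧ (false : Bool) = true))]
          simpa using hrec
      · rw [if_neg hm]
        have h2 : ¬ (c = '-' ∧ pvFold done = true) := fun h => hm h.1
        rw [if_neg h2]
        exact hrec

theorem pvBLoop_ge : ∀ (rest : List Char) (pos : Nat) (prev : Bool),
    pvBLoop rest pos prev = -1 ∨ (pos : Int) ≤ pvBLoop rest pos prev := by
  intro rest
  induction rest with
  | nil => intro pos prev; left; rfl
  | cons c rest ih =>
    intro pos prev
    rw [pvBLoop]
    by_cases h1 : c = '*' ∨ c = '/' ∨ c = '+' ∨ c = '^'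
    · right; simp [h1]
    · by_cases h2 : c = '-' ∧ prev = true
      · right; simp [h2]
      · rw [if_neg h1, if_neg h2]
        rcases ih (pos + 1) (if c ≠ ' ' then PySem.Chars.isdigit c else prev) with h | h
        · left; exact h
        · right; omega

theorem pvToList_ne_nil (txt : String) (h : txt ≠ "") : txt.toList ≠ [] := by
  intro hc
  apply h
  have := congrArg String.ofList hc
  simpa using this

-- ===== VERDICT (by name: the statement is the Claim_ definition above) =====
theorem findNextOpr_spec : Claim_unchanged_findNextOpr := by
  intro txt _ hpre hnD
  have hne := pvToList_ne_nil txt hpre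
  show pvALoop txt.toList txt.toList 0 = pvBLoop txt.toList 0 false
  obtain ⟨c, rest, hcr⟩ := List.exists_cons_of_ne_nil hne
  rw [hcr, pvALoop, pvBLoop]
  by_cases hop : c = '*' ∨ c = '/' ∨ c = '+' ∨ c = '^'
  · simp [hop]
  · have hrec : pvALoop (c :: rest) rest 1 = pvBLoop rest 1 (pvFold [c]) := by
      have := pvMain rest [c] (by simp)
      simpa using this
    have hupd : (if c ≠ ' ' then PySem.Chars.isdigit c else false) = pvFold [c] := by
      simp [pvFold]
    simp only [if_neg hop, Nat.zero_add]
    by_cases hm : c = '-'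
    · subst hm
      have hfold : pvFold ('-' :: rest) = false := by
        cases hfb : pvFold ('-' :: rest) with
        | false => rfl
        | true =>
          exact absurd ⟨by rw [hcr]; rfl, by
            rw [hcr, ← pvFold_eq_lastNonSpaceDigit]; exact hfb⟩ hnD
      rw [if_pos rfl]
      have hslice : pvASlice ('-' :: rest) 0 = ('-' :: rest).reverse := by
        simp [pvASlice]
      rw [hslice, pvAInner_reverse, hfold]
      rw [if_neg (by simp : ¬('-' = '-' ∧ (false : Bool) = true))]
      simp only [Bool.false_eq_true, if_false]
      rw [hrec, ← hupd]
    · rw [if_neg hm]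
      have h2 : ¬ (c = '-' ∧ (false : Bool) = true) := fun h => hm h.1
      rw [if_neg h2, hrec, ← hupd]

theorem findNextOpr_changed : Claim_changed_findNextOpr := by
  unfold Claim_changed_findNextOpr; decide

theorem findNextOpr_tight : Claim_exact_findNextOpr := by
  intro txt _ _ hD
  obtain ⟨hhead, hlast⟩ := hD
  obtain ⟨rest, hcr⟩ : ∃ rest, txt.toList = '-' :: rest := by
    cases h : txt.toList with
    | nil => rw [h] at hhead; simp at hhead
    | cons c r =>
      rw [h] at hhead
      simp at hhead
      exact ⟨r, by rw [hhead]⟩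
  have hfold : pvFold ('-' :: rest) = true := by
    rw [pvFold_eq_lastNonSpaceDigit, ← hcr]; exact hlast
  have hA : findNextOpr txt = 0 := by
    show pvALoop txt.toList txt.toList 0 = 0
    rw [hcr, pvALoop]
    rw [if_neg (by decide), if_pos rfl]
    have hslice : pvASlice ('-' :: rest) 0 = ('-' :: rest).reverse := by
      simp [pvASlice]
    rw [hslice, pvAInner_reverse, hfold]
    simp
  have hB : findNextOpr_alt txt = pvBLoop rest 1 false := by
    show pvBLoop txt.toList 0 false = _
    rw [hcr, pvBLoop]
    rw [if_neg (by decide), if_neg (by simp : ¬('-' = '-' ∧ (false : Bool) = true))]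
    have hdg : PySem.Chars.isdigit '-' = false := by decide
    simp [hdg]
  rw [hA, hB]
  rcases pvBLoop_ge rest 1 false with h | h <;> omega
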